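-- pv_equiv track=rewrite | github.com/RODZAKI/rodzaki-quasantum | tools/cluster_refine.py | build_sym_graph
-- ===== SOURCE A (Python) =====
-- def build_sym_graph(artifacts):
--     graph = {aid: set() for aid in artifacts.keys()}
--
--     for aid, a in artifacts.items():
--         for r in a.get("relations", []):
--             bid = r["target"]
--             if bid not in artifacts:
--                 continue
--             b_rels = artifacts[bid].get("relations", [])
--             if any(x["target"] == aid for x in b_rels):
--                 graph[aid].add(bid)
--                 graph[bid].add(aid)
--
--     return graph
-- ===== SOURCE B (Python) =====
-- def build_sym_graph(artifacts):
--     # Group every kept directed relation under its unordered (normalized) key and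
--     # record which orientation(s) occurred; a pair is symmetric iff both
--     # orientations occurred (a self-loop is its own reverse, so one suffices).
--     groups = {}
--     for aid, a in artifacts.items():
--         for r in a.get("relations", []):
--             bid = r["target"]
--             if bid not in artifacts:
--                 continue
--             key = (aid, bid) if aid <= bid else (bid, aid)
--             f, b = groups.get(key, (False, False))
--             groups[key] = (True, b) if aid <= bid else (f, True)
--
--     graph = {aid: set() for aid in artifacts}
--     for (u, v), (f, b) in groups.items():
--         if (f and b) or (u == v and (f or b)):
--             graph[u].add(v)
--             graph[v].add(u)
--     return graph
-- ===== Notes on version B (the rewrite author's own statement) =====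
-- stated objective: alternative
-- what changed: Instead of testing each directed edge for a reverse edge (A scans the target's relation list), B groups the directed edges under a normalized unordered key with two orientation flags and emits an edge per group whose both orientations (or, for a self-loop, either) occurred.
import Mathlib
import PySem

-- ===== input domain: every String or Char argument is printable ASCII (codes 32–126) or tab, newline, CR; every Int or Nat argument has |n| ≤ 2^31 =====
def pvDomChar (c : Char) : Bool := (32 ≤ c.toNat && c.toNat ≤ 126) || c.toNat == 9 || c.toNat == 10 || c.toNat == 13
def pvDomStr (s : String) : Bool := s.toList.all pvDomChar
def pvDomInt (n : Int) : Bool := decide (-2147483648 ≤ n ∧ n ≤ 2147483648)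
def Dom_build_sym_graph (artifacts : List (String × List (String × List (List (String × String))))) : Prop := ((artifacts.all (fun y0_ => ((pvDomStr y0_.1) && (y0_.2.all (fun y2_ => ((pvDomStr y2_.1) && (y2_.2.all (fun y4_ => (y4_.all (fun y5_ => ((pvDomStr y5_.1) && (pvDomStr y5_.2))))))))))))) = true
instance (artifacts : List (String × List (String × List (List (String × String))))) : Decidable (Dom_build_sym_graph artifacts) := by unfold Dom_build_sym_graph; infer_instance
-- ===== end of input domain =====

-- B replaces A's per-edge scan for a reverse relation by grouping the directed edges under a
-- normalized unordered key with two orientation flags (objective: alternative algorithm).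

-- Shared transliteration helpers (both Pythons contain these identical sub-expressions):
-- r["target"]  — Pre_ guarantees the key is present, where getD is exact
def pvTarget (r : List (String × String)) : String := (PySem.Dict.mk r).getD "target" ""
-- a.get("relations", [])
def pvRels (a : List (String × List (List (String × String)))) : List (List (String × String)) :=
  (PySem.Dict.mk a).getD "relations" []
-- graph[x].add(y); graph[y].add(x)  (the same two statements in A and in B)
def pvAdd2 (g : PySem.Dict String (List String)) (a b : String) : PySem.Dict String (List String) :=
  (g.modify a [] (fun s => PySem.Set.add s b)).modify b [] (fun s => PySem.Set.add s a)

-- ===== PORT A =====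
def build_sym_graph (artifacts : List (String × List (String × List (List (String × String))))) : List (String × List String) :=
  let d := PySem.Dict.mk artifacts
  let graph0 : PySem.Dict String (List String) :=
    PySem.Dict.mk (artifacts.map (fun p => (p.1, ([] : List String))))
  let graph := artifacts.foldl (fun g p =>
      (pvRels p.2).foldl (fun g r =>
        if d.contains (pvTarget r) then
          if (pvRels (d.getD (pvTarget r) [])).any (fun x => pvTarget x == p.1) then
            pvAdd2 g p.1 (pvTarget r)
          else g
        else g) g) graph0
  graph.items

-- ===== PORT B =====
def build_sym_graph_alt (artifacts : List (String × List (String × List (List (String × String))))) : List (String × List String) :=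
  let d := PySem.Dict.mk artifacts
  -- groups: normalized unordered key ↦ (forward-orientation seen, backward-orientation seen)
  let groups : PySem.Dict (String × String) (Bool × Bool) :=
    artifacts.foldl (fun g p =>
      (pvRels p.2).foldl (fun g r =>
        if d.contains (pvTarget r) then
          g.modify (if p.1 ≤ pvTarget r then (p.1, pvTarget r) else (pvTarget r, p.1)) (false, false)
            (fun q => if p.1 ≤ pvTarget r then (true, q.2) else (q.1, true))
        else g) g) PySem.Dict.empty
  let graph0 : PySem.Dict String (List String) :=
    PySem.Dict.mk (artifacts.map (fun p => (p.1, ([] : List String))))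
  let graph := groups.items.foldl (fun g kv =>
      if (kv.2.1 && kv.2.2) || (kv.1.1 == kv.1.2 && (kv.2.1 || kv.2.2)) then
        pvAdd2 g kv.1.1 kv.1.2
      else g) graph0
  graph.items

-- ===== PRECONDITION & SPEC =====
-- Pre_ excludes (i) inputs where some relation dict lacks the "target" key — A raises KeyError
-- there — and (ii) duplicate keys at any dict level, where the association-list input is an
-- ambiguous encoding of a Python dict (duplicate keys collapse when the dict is built).
def Pre_build_sym_graph (artifacts : List (String × List (String × List (List (String × String))))) : Prop :=
  (artifacts.map Prod.fst).Nodup ∧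
  ∀ p ∈ artifacts, (p.2.map Prod.fst).Nodup ∧
    ∀ r ∈ pvRels p.2, (r.map Prod.fst).Nodup ∧ (PySem.Dict.mk r).contains "target" = true
instance (artifacts : List (String × List (String × List (List (String × String))))) : Decidable (Pre_build_sym_graph artifacts) := by unfold Pre_build_sym_graph; infer_instance

def pvWitness_build_sym_graph : (List (String × List (String × List (List (String × String))))) :=
  [("a", [("relations", [[("target", "b")]])]), ("b", [("relations", [[("target", "a")]])]), ("c", [])]

def Spec_build_sym_graph (artifacts : List (String × List (String × List (List (String × String))))) (out : List (String × List String)) : Prop := out = build_sym_graph_alt artifacts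
instance (artifacts : List (String × List (String × List (List (String × String))))) (out : List (String × List String)) : Decidable (Spec_build_sym_graph artifacts out) := by unfold Spec_build_sym_graph; infer_instance

-- ===== CLAIM (what is proved, stated in full; the proofs are below) =====
def Claim_equal_build_sym_graph : Prop := ∀ (artifacts : List (String × List (String × List (List (String × String))))), Dom_build_sym_graph artifacts → Pre_build_sym_graph artifacts → Spec_build_sym_graph artifacts (build_sym_graph artifacts)

-- ===== LEMMAS AND PROOFS =====

-- the normalized (unordered) key of a directed edge
def pvN (e : String × String) : String × String := if e.1 ≤ e.2 then (e.1, e.2) else (e.2, e.1)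

-- The flat directed-edge list both loops traverse (source key, kept target)
def pvE (artifacts : List (String × List (String × List (List (String × String))))) : List (String × String) :=
  artifacts.flatMap (fun p =>
    ((pvRels p.2).filter (fun r => (PySem.Dict.mk artifacts).contains (pvTarget r))).map (fun r => (p.1, pvTarget r)))

-- orientation flags a key accumulates while scanning a list of directed edges
def pvFwd (l : List (String × String)) (k : String × String) : Bool :=
  l.any (fun e => e == k && decide (e.1 ≤ e.2))
def pvBwd (l : List (String × String)) (k : String × String) : Bool :=
  l.any (fun e => e == (k.2, k.1) && !decide (e.1 ≤ e.2))

-- "the unordered pair k is a mutual relation" and the canonical per-key step both folds meet at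
def pvMut (E : List (String × String)) (k : String × String) : Bool :=
  decide (k ∈ E) && decide ((k.2, k.1) ∈ E)
def pvStep (E : List (String × String)) (g : PySem.Dict String (List String)) (k : String × String) :
    PySem.Dict String (List String) :=
  if pvMut E k then pvAdd2 g k.1 k.2 else g

-- B's grouping update, as a function of the directed edge
def pvUpd (g : PySem.Dict (String × String) (Bool × Bool)) (e : String × String) :
    PySem.Dict (String × String) (Bool × Bool) :=
  g.modify (pvN e) (false, false) (fun q => if e.1 ≤ e.2 then (true, q.2) else (q.1, true))

-- generic flattening of the nested artifact→relation traversal (used for both ports)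
theorem pv_flat_inner {G : Type} (h : G → String × String → G)
    (d : PySem.Dict String (List (String × List (List (String × String)))))
    (aid : String) (rels : List (List (String × String))) (g : G) :
    rels.foldl (fun g r => if d.contains (pvTarget r) then h g (aid, pvTarget r) else g) g
    = ((rels.filter (fun r => d.contains (pvTarget r))).map (fun r => (aid, pvTarget r))).foldl h g := by
  induction rels generalizing g with
  | nil => rfl
  | cons r rels ih =>
    by_cases hc : d.contains (pvTarget r) = true
    · simp only [List.foldl_cons, List.filter_cons, hc, if_pos, List.map_cons]
      exact ih _
    · have hb : d.contains (pvTarget r) = false := by simpa using hc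
      simp only [List.foldl_cons, List.filter_cons, hb, Bool.false_eq_true, if_false]
      exact ih _

theorem pv_flat {G : Type} (h : G → String × String → G)
    (d : PySem.Dict String (List (String × List (List (String × String)))))
    (l : List (String × List (String × List (List (String × String))))) (g : G) :
    l.foldl (fun g p =>
      (pvRels p.2).foldl (fun g r => if d.contains (pvTarget r) then h g (p.1, pvTarget r) else g) g) g
    = (l.flatMap (fun p => ((pvRels p.2).filter (fun r => d.contains (pvTarget r))).map (fun r => (p.1, pvTarget r)))).foldl h g := by
  induction l generalizing g with
  | nil => rfl
  | cons p l ih =>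
    simp only [List.foldl_cons, List.flatMap_cons, List.foldl_append]
    rw [pv_flat_inner]
    exact ih _

-- for edges of pvE, A's `any` scan over the target's relations is reverse-edge membership in pvE
theorem pv_cond_eq (artifacts : List (String × List (String × List (List (String × String)))))
    (hnd : (artifacts.map Prod.fst).Nodup) (e : String × String) (he : e ∈ pvE artifacts) :
    (pvRels ((PySem.Dict.mk artifacts).getD e.2 [])).any (fun x => pvTarget x == e.1)
      = decide ((e.2, e.1) ∈ pvE artifacts) := by
  have hkeys : ((PySem.Dict.mk artifacts).keys) = artifacts.map Prod.fst := rfl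
  have hmemE : ∀ (u : String × String), u ∈ pvE artifacts ↔
      ∃ q ∈ artifacts, ∃ r ∈ pvRels q.2,
        (PySem.Dict.mk artifacts).contains (pvTarget r) = true ∧ q.1 = u.1 ∧ pvTarget r = u.2 := by
    intro u
    constructor
    · intro hu
      simp only [pvE, List.mem_flatMap, List.mem_map, List.mem_filter] at hu
      obtain ⟨q, hq, r, ⟨hr, hc⟩, heq⟩ := hu
      exact ⟨q, hq, r, hr, hc, by rw [← heq], by rw [← heq]⟩
    · intro ⟨q, hq, r, hr, hc, h1, h2⟩
      simp only [pvE, List.mem_flatMap, List.mem_map, List.mem_filter]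
      exact ⟨q, hq, r, ⟨hr, hc⟩, by rw [h1, h2]⟩
  obtain ⟨q0, hq0, r0, hr0, hc0, h10, h20⟩ := (hmemE e).mp he
  have hcont1 : (PySem.Dict.mk artifacts).contains e.1 = true := by
    simp only [PySem.Dict.contains, List.any_eq_true]
    exact ⟨q0, hq0, by simp [h10]⟩
  have hcont2 : (PySem.Dict.mk artifacts).contains e.2 = true := by rw [← h20]; exact hc0
  rw [Bool.eq_iff_iff, List.any_eq_true, decide_eq_true_iff]
  constructor
  · intro ⟨x, hx, hxt⟩
    have hfind : ∃ q, artifacts.find? (fun p => p.1 == e.2) = some q := by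
      have : (artifacts.find? (fun p => p.1 == e.2)).isSome := by
        rw [List.find?_isSome]
        simp only [PySem.Dict.contains, List.any_eq_true] at hcont2
        exact hcont2
      exact Option.isSome_iff_exists.mp this
    obtain ⟨q, hq⟩ := hfind
    have hqmem : q ∈ artifacts := List.mem_of_find?_eq_some hq
    have hqkey : q.1 = e.2 := by
      have := List.find?_some hq
      simpa using this
    have hgetD : (PySem.Dict.mk artifacts).getD e.2 [] = q.2 := by
      rw [PySem.Dict.getD, PySem.Dict.get?]
      show (Option.map _ (List.find? _ artifacts)).getD [] = q.2
      rw [hq]; rfl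
    refine (hmemE _).mpr ⟨q, hqmem, x, by rw [← hgetD]; exact hx, ?_, hqkey, by simpa using hxt⟩
    have : pvTarget x = e.1 := by simpa using hxt
    rw [this]; exact hcont1
  · intro hu
    obtain ⟨q, hq, r, hr, hc, h1, h2⟩ := (hmemE _).mp hu
    have hget : (PySem.Dict.mk artifacts).get? q.1 = some q.2 :=
      PySem.Dict.get?_of_mem_items (PySem.Dict.mk artifacts) (by simpa using hq) (by rw [hkeys]; exact hnd)
    have h1' : q.1 = e.2 := h1
    have hgetD : (PySem.Dict.mk artifacts).getD e.2 [] = q.2 := by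
      rw [PySem.Dict.getD, ← h1', hget]; rfl
    exact ⟨r, by rw [hgetD]; exact hr, by simp [h2]⟩

-- endpoints of a kept edge are keys of the artifact dict
theorem pv_endpoints (artifacts : List (String × List (String × List (List (String × String)))))
    (e : String × String) (he : e ∈ pvE artifacts) :
    (PySem.Dict.mk artifacts).contains e.1 = true ∧ (PySem.Dict.mk artifacts).contains e.2 = true := by
  simp only [pvE, List.mem_flatMap, List.mem_map, List.mem_filter] at he
  obtain ⟨q, hq, r, ⟨hr, hc⟩, heq⟩ := he
  constructor
  · simp only [PySem.Dict.contains, List.any_eq_true]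
    exact ⟨q, hq, by rw [← heq]; simp⟩
  · rw [← heq]; exact hc

-- fold congruence along an invariant
theorem pv_foldl_congr_inv {α G : Type} (I : G → Prop) (f f' : G → α → G)
    (hf : ∀ g e, I g → I (f g e)) :
    ∀ (l : List α) (g : G), I g → (∀ g' e, e ∈ l → I g' → f g' e = f' g' e) →
      l.foldl f g = l.foldl f' g := by
  intro l
  induction l with
  | nil => intro g _ _; rfl
  | cons e l ih =>
    intro g hI hEq
    rw [List.foldl_cons, List.foldl_cons, ← hEq g e List.mem_cons_self hI]
    exact ih (f g e) (hf g e hI) (fun g' e' he' hI' => hEq g' e' (List.mem_cons_of_mem _ he') hI')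

-- pvAdd2 is symmetric in its two (present) keys
theorem pv_add2_comm (g : PySem.Dict String (List String)) (a b : String)
    (ha : g.contains a = true) (hb : g.contains b = true) :
    pvAdd2 g a b = pvAdd2 g b a := by
  by_cases hab : a = b
  · rw [hab]
  · unfold pvAdd2
    rw [PySem.Dict.modify.eq_1, PySem.Dict.modify.eq_1, PySem.Dict.modify.eq_1, PySem.Dict.modify.eq_1]
    rw [PySem.Dict.getD_insert_of_ne _ _ _ (fun h : b = a => hab h.symm),
        PySem.Dict.getD_insert_of_ne _ _ _ hab]
    apply PySem.Dict.ext
    have hca : (g.insert b (PySem.Set.add (g.getD b []) a)).contains a = true := by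
      rw [PySem.Dict.contains_insert]; simp [ha]
    have hcb : (g.insert a (PySem.Set.add (g.getD a []) b)).contains b = true := by
      rw [PySem.Dict.contains_insert]; simp [hb]
    rw [PySem.Dict.items_insert_of_contains _ _ hcb, PySem.Dict.items_insert_of_contains _ _ hca,
        PySem.Dict.items_insert_of_contains _ _ ha, PySem.Dict.items_insert_of_contains _ _ hb,
        List.map_map, List.map_map]
    apply List.map_congr_left
    intro p hp
    by_cases hpa : (p.1 == a) = true
    · have : (p.1 == b) = false := by
        have : p.1 = a := eq_of_beq hpa
        simp [this, hab]
      simp [Function.comp, hpa, this, hab]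
    · by_cases hpb : (p.1 == b) = true
      · simp [Function.comp, hpa, hpb]
        intro h
        exact absurd h.symm hab
      · simp [Function.comp, hpa, hpb]

-- small facts about pvAdd2 and Dict (from the shared toolkit)
theorem pv_add_of_mem {s : List String} {x : String} (h : x ∈ s) : PySem.Set.add s x = s := by
  simp [PySem.Set.add, PySem.Set.contains, h]

theorem pv_insert_getD_self (g : PySem.Dict String (List String)) (k : String) (v0 : List String)
    (hc : g.contains k = true) (hn : g.keys.Nodup) : g.insert k (g.getD k v0) = g := by
  apply PySem.Dict.ext
  rw [PySem.Dict.items_insert_of_contains _ _ hc]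
  conv_rhs => rw [← List.map_id g.items]
  apply List.map_congr_left
  intro p hp
  by_cases hpk : (p.1 == k) = true
  · have hk : p.1 = k := eq_of_beq hpk
    have hget : g.get? p.1 = some p.2 :=
      PySem.Dict.get?_of_mem_items g (by simpa using hp) hn
    have hval : g.getD k v0 = p.2 := by rw [PySem.Dict.getD, ← hk, hget]; rfl
    rw [if_pos hpk, hval, ← hk]
    simp
  · simp [hpk]

theorem pv_modify_id (g : PySem.Dict String (List String)) (k : String) (v0 : List String)
    (f : List String → List String) (hc : g.contains k = true) (hn : g.keys.Nodup)
    (hf : f (g.getD k v0) = g.getD k v0) : g.modify k v0 f = g := by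
  rw [PySem.Dict.modify.eq_1, hf]
  exact pv_insert_getD_self g k v0 hc hn

theorem pv_nodup_add2 (g : PySem.Dict String (List String)) (a b : String)
    (h : g.keys.Nodup) : (pvAdd2 g a b).keys.Nodup := by
  simp only [pvAdd2, PySem.Dict.modify.eq_1]
  exact PySem.Dict.nodup_keys_insert _ _ _ (PySem.Dict.nodup_keys_insert _ _ _ h)

theorem pv_contains_add2 (g : PySem.Dict String (List String)) (a b k : String)
    (h : g.contains k = true) : (pvAdd2 g a b).contains k = true := by
  simp [pvAdd2, PySem.Dict.contains_modify, h]

theorem pv_contains_add2_self (g : PySem.Dict String (List String)) (a b : String) :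
    (pvAdd2 g a b).contains a = true ∧ (pvAdd2 g a b).contains b = true := by
  constructor <;> simp [pvAdd2, PySem.Dict.contains_modify]

theorem pv_getD_add2_superset (g : PySem.Dict String (List String)) (a b k v : String)
    (hv : v ∈ g.getD k []) : v ∈ (pvAdd2 g a b).getD k [] := by
  simp only [pvAdd2]
  rw [PySem.Dict.getD_modify]
  by_cases hkb : k = b
  · subst hkb
    rw [if_pos rfl, PySem.Dict.getD_modify]
    by_cases hka : k = a
    · subst hka
      rw [if_pos rfl]
      simp only [PySem.Set.mem_add]
      tauto
    · rw [if_neg hka]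
      simp only [PySem.Set.mem_add]
      tauto
  · rw [if_neg hkb, PySem.Dict.getD_modify]
    by_cases hka : k = a
    · subst hka
      rw [if_pos rfl]
      simp only [PySem.Set.mem_add]
      tauto
    · rw [if_neg hka]
      exact hv

theorem pv_mem_getD_add2 (g : PySem.Dict String (List String)) (a b : String) :
    b ∈ (pvAdd2 g a b).getD a [] ∧ a ∈ (pvAdd2 g a b).getD b [] := by
  simp only [pvAdd2]
  by_cases hab : a = b
  · subst hab
    rw [PySem.Dict.getD_modify_self]
    simp [PySem.Set.mem_add]
  · constructor
    · rw [PySem.Dict.getD_modify, if_neg hab, PySem.Dict.getD_modify_self]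
      simp [PySem.Set.mem_add]
    · rw [PySem.Dict.getD_modify_self, PySem.Dict.getD_modify,
        if_neg (fun h => hab h.symm)]
      simp [PySem.Set.mem_add]

theorem pv_add2_id (g : PySem.Dict String (List String)) (a b : String)
    (hn : g.keys.Nodup) (hca : g.contains a = true) (hcb : g.contains b = true)
    (hma : b ∈ g.getD a []) (hmb : a ∈ g.getD b []) : pvAdd2 g a b = g := by
  unfold pvAdd2
  rw [pv_modify_id g a [] _ hca hn (pv_add_of_mem hma),
    pv_modify_id g b [] _ hcb hn (pv_add_of_mem hmb)]

-- elements all already "processed" (P) fold to a no-op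
theorem pv_foldl_noop {α G : Type} (f : G → α → G) (I : G → Prop) (P : G → α → Prop)
    (hPid : ∀ g e, I g → P g e → f g e = g) :
    ∀ (s : List α) (g : G), I g → (∀ e ∈ s, P g e) → s.foldl f g = g := by
  intro s
  induction s with
  | nil => intro g _ _; rfl
  | cons e s ih =>
    intro g hI hP
    rw [List.foldl_cons, hPid g e hI (hP e (List.mem_cons_self))]
    exact ih g hI (fun e' he' => hP e' (List.mem_cons_of_mem _ he'))

-- a fold whose step is idempotent (in the sense of P) over a list equals the fold over its dedup
theorem pv_foldl_absorb {α G : Type} [BEq α] [LawfulBEq α] (f : G → α → G) (I : G → Prop) (P : G → α → Prop)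
    (hIstep : ∀ g e, I g → I (f g e))
    (hP1 : ∀ g e, I g → P (f g e) e)
    (hPmono : ∀ g e e', I g → P g e → P (f g e') e)
    (hPid : ∀ g e, I g → P g e → f g e = g) :
    ∀ (l : List α) (s : PySem.Set α) (g : G), I g → (∀ e ∈ s, P g e) →
      (l.foldl PySem.Set.add s).foldl f g = l.foldl f g := by
  intro l
  induction l with
  | nil => intro s g hI hP; exact pv_foldl_noop f I P hPid s g hI hP
  | cons e l ih =>
    intro s g hI hP
    rw [List.foldl_cons, List.foldl_cons]
    by_cases hc : PySem.Set.contains s e = true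
    · have hmem : e ∈ s := by simpa [PySem.Set.contains] using hc
      have hadd : PySem.Set.add s e = s := by simp [PySem.Set.add, PySem.Set.contains, hmem]
      rw [hadd, hPid g e hI (hP e hmem)]
      exact ih s g hI hP
    · have hmem : e ∉ s := by simpa [PySem.Set.contains] using hc
      have hadd : PySem.Set.add s e = s ++ [e] := by simp [PySem.Set.add, PySem.Set.contains, hmem]
      have hP' : ∀ e' ∈ s ++ [e], P (f g e) e' := by
        intro e' he'
        rcases List.mem_append.mp he' with h | h
        · exact hPmono g e' e hI (hP e' h)
        · rw [List.mem_singleton.mp h]; exact hP1 g e hI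
      have hI' : I (f g e) := hIstep g e hI
      have hupd : l.foldl PySem.Set.add (s ++ [e])
          = (s ++ [e]) ++ (PySem.Set.ofList l).filter (fun y => !(PySem.Set.contains (s ++ [e]) y)) := by
        exact PySem.Set.update_eq_append_filter _ _
      rw [hadd, hupd, List.foldl_append, List.foldl_append, List.foldl_cons, List.foldl_nil,
        pv_foldl_noop f I P hPid s g hI hP]
      have h2 : (l.foldl PySem.Set.add (s ++ [e])).foldl f (f g e) = l.foldl f (f g e) :=
        ih (s ++ [e]) (f g e) hI' hP'
      rw [hupd, List.foldl_append, List.foldl_append, List.foldl_cons, List.foldl_nil,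
        pv_foldl_noop f I P hPid s (f g e) hI' (fun e' he' => hP' e' (List.mem_append_left _ he')),
        hPid (f g e) e hI' (hP1 g e hI)] at h2
      exact h2

-- the flag pair B's grouping fold holds at key k, as a function of the edges folded so far
theorem pv_getD_groups (l : List (String × String)) :
    ∀ (g : PySem.Dict (String × String) (Bool × Bool)) (k : String × String),
    (l.foldl pvUpd g).getD k (false, false)
      = ((g.getD k (false, false)).1 || pvFwd l k, (g.getD k (false, false)).2 || pvBwd l k) := by
  induction l with
  | nil => intro g k; simp [pvFwd, pvBwd]
  | cons e l ih =>
    intro g k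
    rw [List.foldl_cons, ih]
    have hUpd : (pvUpd g e).getD k (false, false)
        = if k = pvN e then
            (if e.1 ≤ e.2 then (true, (g.getD (pvN e) (false, false)).2)
             else ((g.getD (pvN e) (false, false)).1, true))
          else g.getD k (false, false) := by
      simp only [pvUpd, PySem.Dict.getD_modify]
    have hFwd : pvFwd (e :: l) k = ((e == k && decide (e.1 ≤ e.2)) || pvFwd l k) := by
      simp [pvFwd]
    have hBwd : pvBwd (e :: l) k = ((e == (k.2, k.1) && !decide (e.1 ≤ e.2)) || pvBwd l k) := by
      simp [pvBwd]
    rw [hUpd, hFwd, hBwd]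
    by_cases h : e.1 ≤ e.2
    · have hN : pvN e = e := by simp [pvN, h]
      by_cases hk : k = pvN e
      · rw [if_pos hk, if_pos h, hk, hN]
        simp [h]
      · rw [if_neg hk]
        have hek : (e == k) = false := by
          rw [hN] at hk
          exact beq_eq_false_iff_ne.mpr (fun hh => hk hh.symm)
        simp [hek, h]
    · have hN : pvN e = (e.2, e.1) := by simp [pvN, h]
      by_cases hk : k = pvN e
      · rw [if_pos hk, if_neg h, hk, hN]
        simp [h]
      · rw [if_neg hk]
        have hek : (e == (k.2, k.1)) = false := by
          apply beq_eq_false_iff_ne.mpr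
          intro hh
          apply hk
          rw [hN, hh]
        simp [hek, h]

-- fire condition of B's second pass = mutuality, for a normalized key
theorem pv_fire_eq (E : List (String × String)) (k : String × String) (hk : k.1 ≤ k.2) :
    ((pvFwd E k && pvBwd E k) || (k.1 == k.2 && (pvFwd E k || pvBwd E k))) = pvMut E k := by
  have hfwd : pvFwd E k = decide (k ∈ E) := by
    rw [Bool.eq_iff_iff, decide_eq_true_iff]
    simp only [pvFwd, List.any_eq_true, Bool.and_eq_true, beq_iff_eq, decide_eq_true_iff]
    constructor
    · intro ⟨e, he, h1, _⟩; rw [← h1]; exact he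
    · intro h; exact ⟨k, h, rfl, hk⟩
  by_cases keq : k.1 = k.2
  · have hbwd : pvBwd E k = false := by
      simp only [pvBwd, List.any_eq_false]
      intro e he
      by_cases hek : e = (k.2, k.1)
      · subst hek
        simp [keq]
      · simp [hek]
    have hrev : (k.2, k.1) = k := by
      obtain ⟨x, y⟩ := k
      cases keq
      rfl
    rw [hbwd, hfwd]
    have : (k.1 == k.2) = true := by simp [keq]
    simp [pvMut, this, hrev]
  · have hne : ¬ k.2 ≤ k.1 := fun hh => keq (le_antisymm hk hh)
    have hbwd : pvBwd E k = decide ((k.2, k.1) ∈ E) := by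
      rw [Bool.eq_iff_iff, decide_eq_true_iff]
      simp only [pvBwd, List.any_eq_true, Bool.and_eq_true, beq_iff_eq, Bool.not_eq_true',
        decide_eq_false_iff_not]
      constructor
      · intro ⟨e, he, h1, _⟩; rw [← h1]; exact he
      · intro h; exact ⟨(k.2, k.1), h, rfl, hne⟩
    have : (k.1 == k.2) = false := by simp [keq]
    rw [hfwd, hbwd]
    simp [pvMut, this]

-- every normalized key is ordered
theorem pv_N_le (e : String × String) : (pvN e).1 ≤ (pvN e).2 := by
  unfold pvN
  by_cases h : e.1 ≤ e.2
  · rw [if_pos h]; exact h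
  · rw [if_neg h]; exact le_of_not_ge h

-- per-edge step of A's flattened loop, and per-group step of B's second pass
def pvStepA (artifacts : List (String × List (String × List (List (String × String)))))
    (g : PySem.Dict String (List String)) (e : String × String) : PySem.Dict String (List String) :=
  if (pvRels ((PySem.Dict.mk artifacts).getD e.2 [])).any (fun x => pvTarget x == e.1) then
    pvAdd2 g e.1 e.2
  else g
def pvStepB (g : PySem.Dict String (List String)) (kv : (String × String) × (Bool × Bool)) :
    PySem.Dict String (List String) :=
  if (kv.2.1 && kv.2.2) || (kv.1.1 == kv.1.2 && (kv.2.1 || kv.2.2)) then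
    pvAdd2 g kv.1.1 kv.1.2
  else g
-- the initial graph and the deduplicated normalized-key list both folds end up traversing
def pvG0 (artifacts : List (String × List (String × List (List (String × String))))) :
    PySem.Dict String (List String) :=
  PySem.Dict.mk (artifacts.map (fun p => (p.1, ([] : List String))))
def pvK (artifacts : List (String × List (String × List (List (String × String))))) :
    List (String × String) :=
  PySem.Set.ofList ((pvE artifacts).map pvN)

-- A's result is the canonical fold over the deduplicated normalized keys
theorem pv_A_eq (artifacts : List (String × List (String × List (List (String × String)))))
    (hnd : (artifacts.map Prod.fst).Nodup) :
    build_sym_graph artifacts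
      = ((pvK artifacts).foldl (pvStep (pvE artifacts)) (pvG0 artifacts)).items := by
  have hflat : build_sym_graph artifacts
      = ((pvE artifacts).foldl (pvStepA artifacts) (pvG0 artifacts)).items :=
    congrArg PySem.Dict.items
      (pv_flat (pvStepA artifacts) (PySem.Dict.mk artifacts) artifacts (pvG0 artifacts))
  have hg0keys : (pvG0 artifacts).keys = artifacts.map Prod.fst := by
    simp [pvG0, PySem.Dict.keys, List.map_map]
  have hg0nd : (pvG0 artifacts).keys.Nodup := by rw [hg0keys]; exact hnd
  have hg0c : ∀ k, (PySem.Dict.mk artifacts).contains k = true → (pvG0 artifacts).contains k = true := by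
    intro k hk
    rw [PySem.Dict.contains_iff_mem_keys] at hk ⊢
    rw [hg0keys]
    exact hk
  have hpres : ∀ g e,
      (g.keys.Nodup ∧ ∀ k, (PySem.Dict.mk artifacts).contains k = true → g.contains k = true) →
      ((pvStepA artifacts g e).keys.Nodup ∧
        ∀ k, (PySem.Dict.mk artifacts).contains k = true → (pvStepA artifacts g e).contains k = true) := by
    intro g e ⟨h1, h2⟩
    unfold pvStepA
    split_ifs with hcnd
    · exact ⟨pv_nodup_add2 g _ _ h1, fun k hk => pv_contains_add2 g _ _ k (h2 k hk)⟩
    · exact ⟨h1, h2⟩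
  have hcong : (pvE artifacts).foldl (pvStepA artifacts) (pvG0 artifacts)
      = (pvE artifacts).foldl (fun g e => pvStep (pvE artifacts) g (pvN e)) (pvG0 artifacts) := by
    apply pv_foldl_congr_inv _ _ _ hpres _ _ ⟨hg0nd, hg0c⟩
    intro g e he ⟨h1, h2⟩
    obtain ⟨hc1, hc2⟩ := pv_endpoints artifacts e he
    unfold pvStepA pvStep
    rw [pv_cond_eq artifacts hnd e he]
    by_cases h12 : e.1 ≤ e.2
    · have hNe : pvN e = (e.1, e.2) := by unfold pvN; rw [if_pos h12]
      rw [hNe]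
      have hmut : pvMut (pvE artifacts) (e.1, e.2) = decide ((e.2, e.1) ∈ pvE artifacts) := by
        simp [pvMut, he]
      rw [hmut]
    · have hNe : pvN e = (e.2, e.1) := by unfold pvN; rw [if_neg h12]
      rw [hNe]
      have hmut : pvMut (pvE artifacts) (e.2, e.1) = decide ((e.2, e.1) ∈ pvE artifacts) := by
        simp [pvMut, he]
      rw [hmut]
      by_cases hrev : ((e.2, e.1) ∈ pvE artifacts)
      · rw [if_pos (by simp [hrev]), if_pos (by simp [hrev])]
        exact pv_add2_comm g e.1 e.2 (h2 _ hc1) (h2 _ hc2)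
      · rw [if_neg (by simp [hrev]), if_neg (by simp [hrev])]
  have hmap : (pvE artifacts).foldl (fun g e => pvStep (pvE artifacts) g (pvN e)) (pvG0 artifacts)
      = ((pvE artifacts).map pvN).foldl (pvStep (pvE artifacts)) (pvG0 artifacts) :=
    (List.foldl_map).symm
  have habs : ((pvE artifacts).map pvN).foldl (pvStep (pvE artifacts)) (pvG0 artifacts)
      = (pvK artifacts).foldl (pvStep (pvE artifacts)) (pvG0 artifacts) := by
    refine (pv_foldl_absorb (pvStep (pvE artifacts)) (fun g => g.keys.Nodup)
      (fun g k => pvMut (pvE artifacts) k = true →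
        (g.contains k.1 = true ∧ g.contains k.2 = true ∧ k.2 ∈ g.getD k.1 [] ∧ k.1 ∈ g.getD k.2 []))
      ?_ ?_ ?_ ?_ ((pvE artifacts).map pvN) [] (pvG0 artifacts) hg0nd (by intro e he; cases he)).symm
    · intro g k hI
      unfold pvStep
      by_cases hc : pvMut (pvE artifacts) k = true
      · rw [if_pos hc]; exact pv_nodup_add2 g k.1 k.2 hI
      · rw [if_neg hc]; exact hI
    · intro g k hI hc
      unfold pvStep
      rw [if_pos hc]
      obtain ⟨hm1, hm2⟩ := pv_mem_getD_add2 g k.1 k.2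
      obtain ⟨hs1, hs2⟩ := pv_contains_add2_self g k.1 k.2
      exact ⟨hs1, hs2, hm1, hm2⟩
    · intro g k k' hI hP hc
      obtain ⟨p1, p2, p3, p4⟩ := hP hc
      unfold pvStep
      by_cases hc' : pvMut (pvE artifacts) k' = true
      · rw [if_pos hc']
        exact ⟨pv_contains_add2 _ _ _ _ p1, pv_contains_add2 _ _ _ _ p2,
          pv_getD_add2_superset _ _ _ _ _ p3, pv_getD_add2_superset _ _ _ _ _ p4⟩
      · rw [if_neg hc']; exact ⟨p1, p2, p3, p4⟩
    · intro g k hI hP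
      unfold pvStep
      by_cases hc : pvMut (pvE artifacts) k = true
      · rw [if_pos hc]
        obtain ⟨p1, p2, p3, p4⟩ := hP hc
        exact pv_add2_id g k.1 k.2 hI p1 p2 p3 p4
      · rw [if_neg hc]
  rw [hflat, hcong, hmap, habs]

-- B's result is the same canonical fold
theorem pv_B_eq (artifacts : List (String × List (String × List (List (String × String))))) :
    build_sym_graph_alt artifacts
      = ((pvK artifacts).foldl (pvStep (pvE artifacts)) (pvG0 artifacts)).items := by
  have hflat : (artifacts.foldl (fun g p =>
        (pvRels p.2).foldl (fun g r =>
          if (PySem.Dict.mk artifacts).contains (pvTarget r) then pvUpd g (p.1, pvTarget r) else g) g)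
        PySem.Dict.empty)
      = (pvE artifacts).foldl pvUpd PySem.Dict.empty :=
    pv_flat pvUpd (PySem.Dict.mk artifacts) artifacts PySem.Dict.empty
  have h1 : build_sym_graph_alt artifacts
      = (((pvE artifacts).foldl pvUpd PySem.Dict.empty).items.foldl pvStepB (pvG0 artifacts)).items :=
    congrArg (fun G : PySem.Dict (String × String) (Bool × Bool) =>
      ((PySem.Dict.items G).foldl pvStepB (pvG0 artifacts)).items) hflat
  have hndk : ((pvE artifacts).foldl pvUpd PySem.Dict.empty).keys.Nodup :=
    PySem.Dict.nodup_keys_foldl_modify_key (pvE artifacts) pvN (false, false)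
      (fun _ e q => if e.1 ≤ e.2 then (true, q.2) else (q.1, true)) PySem.Dict.empty (by simp)
  have hkeys : ((pvE artifacts).foldl pvUpd PySem.Dict.empty).keys = pvK artifacts :=
    PySem.Dict.keys_foldl_modify_key (pvE artifacts) pvN (false, false)
      (fun _ e q => if e.1 ≤ e.2 then (true, q.2) else (q.1, true)) PySem.Dict.empty
  have hitems : ((pvE artifacts).foldl pvUpd PySem.Dict.empty).items
      = (pvK artifacts).map (fun k => (k, (pvFwd (pvE artifacts) k, pvBwd (pvE artifacts) k))) := by
    rw [PySem.Dict.items_eq_map_keys _ hndk (false, false), hkeys]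
    apply List.map_congr_left
    intro k hk
    rw [pv_getD_groups (pvE artifacts) PySem.Dict.empty k]
    simp [PySem.Dict.getD_empty]
  have hfire : (pvK artifacts).foldl
        (fun g k => pvStepB g (k, (pvFwd (pvE artifacts) k, pvBwd (pvE artifacts) k))) (pvG0 artifacts)
      = (pvK artifacts).foldl (pvStep (pvE artifacts)) (pvG0 artifacts) := by
    apply PySem.List.foldl_congr_mem
    intro g k hk
    have hkE : k ∈ (pvE artifacts).map pvN := (PySem.Set.mem_ofList _ _).mp hk
    obtain ⟨e, he, hke⟩ := List.mem_map.mp hkE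
    have hk12 : k.1 ≤ k.2 := by rw [← hke]; exact pv_N_le e
    show (if (pvFwd (pvE artifacts) k && pvBwd (pvE artifacts) k)
            || (k.1 == k.2 && (pvFwd (pvE artifacts) k || pvBwd (pvE artifacts) k)) then
          pvAdd2 g k.1 k.2 else g)
        = (if pvMut (pvE artifacts) k then pvAdd2 g k.1 k.2 else g)
    rw [pv_fire_eq (pvE artifacts) k hk12]
  rw [h1, hitems, List.foldl_map, hfire]

-- ===== VERDICT (by name: the statement is the Claim_ definition above) =====
theorem build_sym_graph_spec : Claim_equal_build_sym_graph := by
  intro artifacts hdom hpre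
  show build_sym_graph artifacts = build_sym_graph_alt artifacts
  obtain ⟨hnd, -⟩ := hpre
  rw [pv_A_eq artifacts hnd, pv_B_eq artifacts]
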